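-- pv_equiv track=rewrite | github.com/Dinoryong/Problem-Solving | Educativeio/5번.py | solution
-- ===== SOURCE A (Python) =====
-- def solution(N, coffee_times):
--     import heapq
--
--     class task:
--         def __init__(self, idx, process):
--             self.idx = idx
--             self.process = process
--
--         def __lt__(self, other):
--             if self.process != other.process: return self.process < other.process
--             return self.idx < other.idx
--
--     # li = [4, 2, 2, 5, 3]
--
--     nowTime = 0
--     # n = 3
--
--     heap = []
--     for i in range(0, N):
--         heap.append(task(i, coffee_times[i]))
--
--     heapq.heapify(heap)
--
--     result = []
--     for i in range(N, len(coffee_times)):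
--         # 완료된 작업 빼기
--         complete = heapq.heappop(heap)
--         result.append(complete.idx + 1)
--         nowtime = complete.process
--         # 새로운작업 넣기 (끝나는 시간 기준)
--         heapq.heappush(heap, task(i, coffee_times[i] + nowtime))
--
--     while (heap):
--         result.append(heapq.heappop(heap).idx + 1)
--
--
--     return result
-- ===== SOURCE B (Python) =====
-- def solution(N, coffee_times):
--     def insert_sorted(lst, item):
--         j = 0
--         while j < len(lst) and lst[j] < item:
--             j += 1
--         lst.insert(j, item)
--
--     active = []
--     for i in range(N):
--         insert_sorted(active, (coffee_times[i], i))
--     result = []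
--     for i in range(N, len(coffee_times)):
--         p, idx = active.pop(0)
--         result.append(idx + 1)
--         insert_sorted(active, (coffee_times[i] + p, i))
--     for p, idx in active:
--         result.append(idx + 1)
--     return result
-- ===== Notes on version B (the rewrite author's own statement) =====
-- stated objective: simpler
-- what changed: Replaces A's heapq heap of comparable task objects by a plain sorted list of (process_time, index) tuples: push becomes an ordered linear insertion, pop becomes taking the head, and the final drain is just walking the already-sorted list.
import Mathlib
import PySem

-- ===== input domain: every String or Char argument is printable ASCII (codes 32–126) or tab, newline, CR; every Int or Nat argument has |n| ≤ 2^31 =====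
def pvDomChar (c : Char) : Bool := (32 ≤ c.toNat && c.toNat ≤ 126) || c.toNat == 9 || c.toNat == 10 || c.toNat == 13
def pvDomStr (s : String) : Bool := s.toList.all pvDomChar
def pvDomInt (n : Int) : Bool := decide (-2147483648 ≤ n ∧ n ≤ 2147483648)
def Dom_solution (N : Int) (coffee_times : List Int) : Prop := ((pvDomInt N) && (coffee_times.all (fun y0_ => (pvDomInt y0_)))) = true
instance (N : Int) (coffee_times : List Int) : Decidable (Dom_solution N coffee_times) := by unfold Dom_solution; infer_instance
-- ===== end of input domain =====

-- B replaces A's heap of task objects by a sorted list of (process, index) pairs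
-- (pop = head, push = ordered insert); same return value, different priority-queue structure.

-- Python tuple/(task.__lt__) order: by process, then index.
def pvLt (a b : Int × Int) : Bool := a.1 < b.1 || (a.1 == b.1 && a.2 < b.2)

-- ===== PORT A =====
-- heapq is an imported library, modelled by its contract: heappop returns (and removes) the
-- smallest element under task.__lt__ (first occurrence), heappush adds the element; the heap's
-- internal array layout is not observable in A's return value. heapify is the identity on contents.
def popMinA : List (Int × Int) → Option ((Int × Int) × List (Int × Int))
  | [] => none          -- heappop from an empty heap: IndexError (none)
  | x :: xs =>
    match popMinA xs with
    | none => some (x, [])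
    | some (m, rest) => if pvLt m x then some (m, x :: rest) else some (x, xs)

-- for i in range(0, N): heap.append(task(i, coffee_times[i]))   (stored as (process, idx))
def seedA (coffee : List Int) : List Int → List (Int × Int) → Option (List (Int × Int))
  | [], acc => some acc
  | i :: is, acc =>
    match PySem.List.pyGet? coffee i with
    | none => none      -- coffee_times[i]: IndexError
    | some c => seedA coffee is (acc ++ [(c, i)])

-- for i in range(N, len(coffee_times)): pop, record idx+1, push (coffee_times[i] + nowtime, i)
def loopA (coffee : List Int) : List Int → List (Int × Int) → List Int →
    Option (List (Int × Int) × List Int)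
  | [], heap, result => some (heap, result)
  | i :: is, heap, result =>
    match popMinA heap with
    | none => none
    | some (m, h') =>
      match PySem.List.pyGet? coffee i with
      | none => none
      | some c => loopA coffee is (h' ++ [(c + m.1, i)]) (result ++ [m.2 + 1])

theorem popMinA_length : ∀ {a : List (Int × Int)} {m rest},
    popMinA a = some (m, rest) → rest.length < a.length := by
  intro a
  induction a with
  | nil => intro m rest h; simp [popMinA] at h
  | cons x xs ih =>
    intro m rest h
    simp only [popMinA] at h
    cases hx : popMinA xs with
    | none =>
      rw [hx] at h; cases h; simp
    | some p =>
      obtain ⟨m', r'⟩ := p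
      rw [hx] at h
      by_cases hc : pvLt m' x = true
      · simp [hc] at h
        obtain ⟨h1, h2⟩ := h
        subst h2
        have := ih hx
        simp; omega
      · simp [hc] at h
        obtain ⟨h1, h2⟩ := h
        subst h2; simp

-- while heap: result.append(heappop(heap).idx + 1)
def drainA (heap : List (Int × Int)) (result : List Int) : List Int :=
  match h : popMinA heap with
  | none => result
  | some (m, rest) => drainA rest (result ++ [m.2 + 1])
termination_by heap.length
decreasing_by exact popMinA_length h

def solution (N : Int) (coffee_times : List Int) : List Int :=
  match seedA coffee_times (PySem.List.pyRange 0 N 1) [] with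
  | none => []          -- Python raises IndexError here; excluded by Pre_solution
  | some heap =>
    match loopA coffee_times (PySem.List.pyRange N (coffee_times.length) 1) heap [] with
    | none => []        -- Python raises IndexError here; excluded by Pre_solution
    | some (heap', result) => drainA heap' result

-- ===== PORT B =====
-- insert_sorted: advance past smaller items, insert before the first not-smaller one.
def insSorted (x : Int × Int) : List (Int × Int) → List (Int × Int)
  | [] => [x]
  | y :: ys => if pvLt y x then y :: insSorted x ys else x :: y :: ys

def seedB (coffee : List Int) : List Int → List (Int × Int) → Option (List (Int × Int))
  | [], acc => some acc
  | i :: is, acc =>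
    match PySem.List.pyGet? coffee i with
    | none => none
    | some c => seedB coffee is (insSorted (c, i) acc)

def loopB (coffee : List Int) : List Int → List (Int × Int) → List Int →
    Option (List (Int × Int) × List Int)
  | [], active, result => some (active, result)
  | i :: is, active, result =>
    match active with
    | [] => none        -- active.pop(0) on empty: IndexError
    | (p, idx) :: rest =>
      match PySem.List.pyGet? coffee i with
      | none => none
      | some c => loopB coffee is (insSorted (c + p, i) rest) (result ++ [idx + 1])

def solution_alt (N : Int) (coffee_times : List Int) : List Int :=
  match seedB coffee_times (PySem.List.pyRange 0 N 1) [] with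
  | none => []
  | some active =>
    match loopB coffee_times (PySem.List.pyRange N (coffee_times.length) 1) active [] with
    | none => []
    | some (active', result) => result ++ active'.map (fun t => t.2 + 1)

-- ===== PRECONDITION & SPEC =====
-- Exactly the inputs on which the Python A returns: the first N indices must exist and the
-- main loop must never pop an empty heap, i.e. 1 ≤ N ≤ len, or N = 0 with an empty list.
def Pre_solution (N : Int) (coffee_times : List Int) : Prop :=
  (1 ≤ N ∧ N ≤ coffee_times.length) ∨ (N = 0 ∧ coffee_times = [])
instance (N : Int) (coffee_times : List Int) : Decidable (Pre_solution N coffee_times) := by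
  unfold Pre_solution; infer_instance

def pvWitness_solution : Int × List Int := (3, [4, 2, 2, 5, 3])

def Spec_solution (N : Int) (coffee_times : List Int) (out : List Int) : Prop := out = solution_alt N coffee_times
instance (N : Int) (coffee_times : List Int) (out : List Int) : Decidable (Spec_solution N coffee_times out) := by unfold Spec_solution; infer_instance

-- ===== CLAIM (what is proved, stated in full; the proofs are below) =====
def Claim_equal_solution : Prop := ∀ (N : Int) (coffee_times : List Int), Dom_solution N coffee_times → Pre_solution N coffee_times → Spec_solution N coffee_times (solution N coffee_times)

-- ===== LEMMAS AND PROOFS =====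

-- "a ≤ b" in the (process, idx) order
def pvLe (a b : Int × Int) : Prop := pvLt b a = false

theorem pvLt_asymm {a b : Int × Int} (h : pvLt a b = true) : pvLt b a = false := by
  simp [pvLt] at *; omega

theorem pvLe_refl (a : Int × Int) : pvLe a a := by
  simp [pvLe, pvLt]

theorem pvLe_trans {a b c : Int × Int} (h1 : pvLe a b) (h2 : pvLe b c) : pvLe a c := by
  simp [pvLe, pvLt] at *; omega

theorem pvLe_antisymm {a b : Int × Int} (h1 : pvLe a b) (h2 : pvLe b a) : a = b := by
  simp [pvLe, pvLt] at *
  obtain ⟨a1, a2⟩ := a; obtain ⟨b1, b2⟩ := b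
  simp_all; omega

theorem pvLe_total {a b : Int × Int} (h : pvLt a b = false) : pvLe b a := by
  simp [pvLe, pvLt] at *; omega

theorem insSorted_perm (x : Int × Int) (l : List (Int × Int)) :
    (insSorted x l).Perm (x :: l) := by
  induction l with
  | nil => simp [insSorted]
  | cons y ys ih =>
    simp only [insSorted]
    by_cases h : pvLt y x = true
    · simp [h]
      exact ((ih.cons y).trans (List.Perm.swap x y ys))
    · simp [h]

theorem insSorted_sorted {x : Int × Int} {l : List (Int × Int)}
    (h : l.Pairwise pvLe) : (insSorted x l).Pairwise pvLe := by
  induction l with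
  | nil => simp [insSorted]
  | cons y ys ih =>
    simp only [insSorted]
    rcases List.pairwise_cons.mp h with ⟨hy, hys⟩
    by_cases hc : pvLt y x = true
    · simp only [hc, if_true]
      refine List.pairwise_cons.mpr ⟨?_, ih hys⟩
      intro z hz
      have hz' := (insSorted_perm x ys).mem_iff.mp hz
      rcases List.mem_cons.mp hz' with rfl | hzys
      · exact pvLt_asymm hc
      · exact hy z hzys
    · simp only [hc]
      have hxy : pvLe x y := pvLe_total (by simpa using hc)
      refine List.pairwise_cons.mpr ⟨?_, h⟩
      intro z hz
      rcases List.mem_cons.mp hz with rfl | hzys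
      · exact hxy
      · exact pvLe_trans hxy (hy z hzys)

theorem popMinA_spec : ∀ {a : List (Int × Int)} {m rest},
    popMinA a = some (m, rest) → a.Perm (m :: rest) ∧ ∀ x ∈ a, pvLe m x := by
  intro a
  induction a with
  | nil => intro m rest h; simp [popMinA] at h
  | cons x xs ih =>
    intro m rest h
    simp only [popMinA] at h
    cases hx : popMinA xs with
    | none =>
      rw [hx] at h
      cases h
      have hnil : xs = [] := by
        cases xs with
        | nil => rfl
        | cons z zs =>
          exfalso
          simp only [popMinA] at hx
          cases hz : popMinA zs with
          | none => rw [hz] at hx; simp at hx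
          | some p => obtain ⟨m', r'⟩ := p; rw [hz] at hx; by_cases hc : pvLt m' z = true <;> simp [hc] at hx
      subst hnil
      refine ⟨List.Perm.refl _, ?_⟩
      intro z hz
      simp only [List.mem_singleton] at hz
      subst hz
      exact pvLe_refl _
    | some p =>
      obtain ⟨m', r'⟩ := p
      rw [hx] at h
      obtain ⟨hperm, hmin⟩ := ih hx
      by_cases hc : pvLt m' x = true
      · simp only [hc, if_true, Option.some.injEq, Prod.mk.injEq] at h
        obtain ⟨rfl, rfl⟩ := h
        refine ⟨(hperm.cons x).trans (List.Perm.swap m' x r'), ?_⟩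
        intro z hz
        rcases List.mem_cons.mp hz with rfl | hzxs
        · exact pvLt_asymm hc
        · exact hmin z hzxs
      · simp only [hc] at h
        obtain ⟨rfl, rfl⟩ := h
        refine ⟨List.Perm.refl _, ?_⟩
        intro z hz
        rcases List.mem_cons.mp hz with rfl | hzxs
        · exact pvLe_refl _
        · exact pvLe_trans (pvLe_total (by simpa using hc)) (hmin z hzxs)

theorem popMinA_none_iff {a : List (Int × Int)} : popMinA a = none ↔ a = [] := by
  cases a with
  | nil => simp [popMinA]
  | cons x xs =>
    simp only [popMinA]
    constructor
    · intro h
      cases hx : popMinA xs with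
      | none => rw [hx] at h; simp at h
      | some p => obtain ⟨m', r'⟩ := p; rw [hx] at h; by_cases hc : pvLt m' x = true <;> simp [hc] at h
    · intro h; simp at h

-- If the A-heap is a permutation of the sorted B-list, heappop returns exactly its head.
theorem popMinA_of_sorted {a : List (Int × Int)} {y : Int × Int} {ys : List (Int × Int)}
    (hperm : a.Perm (y :: ys)) (hsort : (y :: ys).Pairwise pvLe) :
    ∃ rest, popMinA a = some (y, rest) ∧ rest.Perm ys := by
  cases hp : popMinA a with
  | none =>
    exfalso
    have ha : a = [] := popMinA_none_iff.mp hp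
    subst ha
    have := hperm.length_eq
    simp at this
  | some p =>
    obtain ⟨m, rest⟩ := p
    obtain ⟨hmr, hmin⟩ := popMinA_spec hp
    have hym : pvLe m y := hmin y (hperm.mem_iff.mpr (by simp))
    have hmy : pvLe y m := by
      have hm_in : m ∈ y :: ys := hperm.mem_iff.mp (hmr.mem_iff.mpr (by simp))
      rcases List.mem_cons.mp hm_in with rfl | hm_ys
      · exact pvLe_refl m
      · exact (List.pairwise_cons.mp hsort).1 m hm_ys
    obtain rfl : m = y := pvLe_antisymm hym hmy
    refine ⟨rest, rfl, ?_⟩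
    exact (hmr.symm.trans hperm).cons_inv

-- The main loops keep: A-heap ~ B-active, B-active sorted, results equal.
theorem loop_eq (coffee : List Int) : ∀ (is : List Int) (heap active : List (Int × Int)) (res : List Int),
    heap.Perm active → active.Pairwise pvLe →
    (loopA coffee is heap res = none ∧ loopB coffee is active res = none) ∨
    (∃ h' a' r', loopA coffee is heap res = some (h', r') ∧
      loopB coffee is active res = some (a', r') ∧ h'.Perm a' ∧ a'.Pairwise pvLe) := by
  intro is
  induction is with
  | nil =>
    intro heap active res hperm hsort
    right
    exact ⟨heap, active, res, rfl, rfl, hperm, hsort⟩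
  | cons i is ih =>
    intro heap active res hperm hsort
    cases active with
    | nil =>
      left
      have : heap = [] := List.Perm.eq_nil hperm
      subst this
      constructor <;> simp [loopA, loopB, popMinA]
    | cons y ys =>
      obtain ⟨p, idx⟩ := y
      obtain ⟨rest, hpop, hrest⟩ := popMinA_of_sorted hperm hsort
      cases hg : PySem.List.pyGet? coffee i with
      | none =>
        left
        constructor
        · simp [loopA, hpop, hg]
        · simp [loopB, hg]
      | some c =>
        have hperm' : (rest ++ [(c + p, i)]).Perm (insSorted (c + p, i) ys) :=
          (List.perm_append_singleton _ _).trans ((hrest.cons _).trans (insSorted_perm _ _).symm)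
        have hsort' : (insSorted (c + p, i) ys).Pairwise pvLe :=
          insSorted_sorted (List.pairwise_cons.mp hsort).2
        have := ih (rest ++ [(c + p, i)]) (insSorted (c + p, i) ys) (res ++ [idx + 1]) hperm' hsort'
        rcases this with ⟨h1, h2⟩ | ⟨h', a', r', h1, h2, h3, h4⟩
        · left
          constructor
          · simp [loopA, hpop, hg]; exact h1
          · simp [loopB, hg]; exact h2
        · right
          refine ⟨h', a', r', ?_, ?_, h3, h4⟩
          · simp [loopA, hpop, hg]; exact h1
          · simp [loopB, hg]; exact h2

theorem seed_eq (coffee : List Int) : ∀ (is : List Int) (accA accB : List (Int × Int)),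
    accA.Perm accB → accB.Pairwise pvLe →
    (seedA coffee is accA = none ∧ seedB coffee is accB = none) ∨
    (∃ h' a', seedA coffee is accA = some h' ∧ seedB coffee is accB = some a' ∧
      h'.Perm a' ∧ a'.Pairwise pvLe) := by
  intro is
  induction is with
  | nil =>
    intro accA accB hperm hsort
    right
    exact ⟨accA, accB, rfl, rfl, hperm, hsort⟩
  | cons i is ih =>
    intro accA accB hperm hsort
    cases hg : PySem.List.pyGet? coffee i with
    | none =>
      left
      constructor <;> simp [seedA, seedB, hg]
    | some c =>
      have hperm' : (accA ++ [(c, i)]).Perm (insSorted (c, i) accB) :=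
        (List.perm_append_singleton _ _).trans ((hperm.cons _).trans (insSorted_perm _ _).symm)
      have := ih (accA ++ [(c, i)]) (insSorted (c, i) accB) hperm' (insSorted_sorted hsort)
      rcases this with ⟨h1, h2⟩ | ⟨h', a', h1, h2, h3, h4⟩
      · left; constructor <;> simp [seedA, seedB, hg, h1, h2]
      · right; exact ⟨h', a', by simp [seedA, hg, h1], by simp [seedB, hg, h2], h3, h4⟩

-- Draining the heap yields the indices of the matching sorted list, in order.
theorem drain_eq : ∀ (active heap : List (Int × Int)) (res : List Int),
    heap.Perm active → active.Pairwise pvLe →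
    drainA heap res = res ++ active.map (fun t => t.2 + 1) := by
  intro active
  induction active with
  | nil =>
    intro heap res hperm _
    have : heap = [] := hperm.eq_nil
    subst this
    rw [drainA]
    split
    · simp
    · next m rest hpop => simp [popMinA] at hpop
  | cons y ys ih =>
    intro heap res hperm hsort
    obtain ⟨rest, hpop, hrest⟩ := popMinA_of_sorted hperm hsort
    rw [drainA]
    split
    · next hnone => rw [hpop] at hnone; cases hnone
    · next m rest' hsome =>
      rw [hpop] at hsome
      have h1 := Option.some.inj hsome
      obtain rfl : y = m := congrArg Prod.fst h1
      obtain rfl : rest = rest' := congrArg Prod.snd h1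
      rw [ih rest (res ++ [y.2 + 1]) hrest (List.pairwise_cons.mp hsort).2]
      simp

-- ===== VERDICT (by name: the statement is the Claim_ definition above) =====
theorem solution_spec : Claim_equal_solution := by
  intro N coffee _dom _pre
  unfold Spec_solution solution solution_alt
  rcases seed_eq coffee (PySem.List.pyRange 0 N 1) [] [] (List.Perm.refl _) (by simp) with
    ⟨h1, h2⟩ | ⟨h', a', h1, h2, h3, h4⟩
  · rw [h1, h2]
  · rw [h1, h2]
    dsimp only
    rcases loop_eq coffee (PySem.List.pyRange N (coffee.length) 1) h' a' [] h3 h4 with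
      ⟨g1, g2⟩ | ⟨hh, aa, rr, g1, g2, g3, g4⟩
    · rw [g1, g2]
    · rw [g1, g2]
      dsimp only
      exact drain_eq aa hh rr g3 g4
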